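-- pv_equiv track=rewrite | github.com/HarnessDesigner/database | utils.py | get_cavity_ids
-- ===== SOURCE A (Python) =====
-- def _sep_cavity_id(id_):
--     res = ''
--
--     if id_[0].isdigit():
--         while not id_[-1].isdigit():
--             res = id_[-1] + res
--             id_ = id_[:-1]
--         res = (id_, res)
--     else:
--         while not id_[0].isdigit():
--             res += id_[0]
--             id_ = id_[1:]
--         res = (res, id_)
--
--     return res
--
-- def enumerate_alpha(start, stop):
--     res = []
--
--     for i in range(ord(start), ord(stop) + 1):
--         res.append(chr(i))
--
--     return res
--
-- def _enumerate_int(start, stop):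
--
--     res = []
--
--     for i in range(int(start), int(stop) + 1):
--         res.append(str(i))
--
--     return res
--
-- def _enumerate_ids(start, stop):
--
--     for char in '1234567890':
--         if char in start:
--             has_numbers = True
--             break
--     else:
--         has_numbers = False
--
--     res = []
--
--     if start.isdigit():
--         res.extend(_enumerate_int(start, stop))
--
--     elif has_numbers:
--         start_prefix, start_suffix = _sep_cavity_id(start)
--         stop_prefix, stop_suffix = _sep_cavity_id(stop)
--
--         if start_prefix.isdigit():
--             for prefix in _enumerate_int(start_prefix, stop_prefix):
--                 for suffix in enumerate_alpha(start_suffix, stop_suffix):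
--                     res.append(f'{prefix}{suffix}')
--         else:
--             res = []
--             for prefix in enumerate_alpha(start_prefix, stop_prefix):
--                 for suffix in _enumerate_int(start_suffix, stop_suffix):
--                     res.append(f'{prefix}{suffix}')
--     else:
--         res.extend(enumerate_alpha(start, stop))
--
--     return res
--
-- def get_cavity_ids(str_cav):
--     in_ids = [item.strip() for item in str_cav.split(',')]
--     out_ids = []
--
--     for id_ in in_ids:
--         if '-' in id_:
--             start_id, stop_id = [item.strip() for item in id_.split('-')]
--             out_ids.extend(_enumerate_ids(start_id, stop_id))
--         else:
--             out_ids.append(id_)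
--
--     return out_ids
-- ===== SOURCE B (Python) =====
-- def _int_range(a, b):
--     return [str(n) for n in range(int(a), int(b) + 1)]
--
-- def _chr_range(a, b):
--     return [chr(n) for n in range(ord(a), ord(b) + 1)]
--
-- def _parse(s):
--     digs = [k for k, c in enumerate(s) if c.isdigit()]
--     if s[0].isdigit():
--         i = digs[-1] + 1
--         return s[:i], s[i:], True
--     j = digs[0]
--     return s[j:], s[:j], False
--
-- def _expand(start, stop):
--     if start.isdigit():
--         return _int_range(start, stop)
--     if not any(c.isdigit() for c in start):
--         return _chr_range(start, stop)
--     s_num, s_alpha, num_first = _parse(start)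
--     t_num, t_alpha, _ = _parse(stop)
--     nums = _int_range(s_num, t_num)
--     alphas = _chr_range(s_alpha, t_alpha)
--     if num_first:
--         return [n + a for n in nums for a in alphas]
--     return [a + n for a in alphas for n in nums]
--
-- def _ids(id_):
--     if '-' not in id_:
--         return [id_]
--     start, stop = [p.strip() for p in id_.split('-')]
--     return _expand(start, stop)
--
-- def get_cavity_ids(str_cav):
--     return [out for item in str_cav.split(',') for out in _ids(item.strip())]
-- ===== Notes on version B (the rewrite author's own statement) =====
-- stated objective: alternative
-- what changed: A's three duplicated enumerator helpers, the two character-peeling while loops of _sep_cavity_id and the doubly-nested append loops are replaced by one index-based parse (digit positions from a single enumerate comprehension, then two slices) and generic range/cross-product comprehensions behind a flat top-level comprehension.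
-- outside the precondition, e.g. on get_cavity_ids('5aa-3b'): A returns [], B raises TypeError; on get_cavity_ids('a1-5'): A returns [], B raises TypeError; on get_cavity_ids('b3-a7x'): A returns [], B raises ValueError
import Mathlib
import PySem

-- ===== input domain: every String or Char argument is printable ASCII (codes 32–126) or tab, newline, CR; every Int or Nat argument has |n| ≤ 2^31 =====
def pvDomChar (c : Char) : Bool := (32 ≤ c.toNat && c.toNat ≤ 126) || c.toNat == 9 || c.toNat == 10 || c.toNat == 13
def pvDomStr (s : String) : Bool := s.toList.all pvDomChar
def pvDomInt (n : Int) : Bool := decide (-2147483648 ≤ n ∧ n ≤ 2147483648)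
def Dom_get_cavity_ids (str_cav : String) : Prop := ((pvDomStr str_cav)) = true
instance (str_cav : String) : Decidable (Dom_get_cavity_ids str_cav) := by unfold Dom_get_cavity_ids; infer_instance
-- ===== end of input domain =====

-- B replaces A's three duplicated enumerators and its two character-peeling while loops by a single
-- index-based parse (the digit positions of the endpoint, computed once with an enumerate comprehension)
-- plus one generic cross-product comprehension; same cost, different decomposition ("alternative").

-- ===== PORT A =====
-- strings are handled as List Char (PySem.Chars) and re-packed with String.ofList at the end

-- the right-peeling while loop of _sep_cavity_id ('while not id_[-1].isdigit(): ...')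
def pvSepR (id_ : List Char) (res : List Char) : List Char × List Char :=
  match h : id_.getLast? with
  | none => (id_, res)                        -- Python raises IndexError here; outside Pre_
  | some c =>
    if PySem.Chars.isdigit c then (id_, res)
    else pvSepR id_.dropLast (c :: res)
termination_by id_.length
decreasing_by
  have hne : id_ ≠ [] := by intro e; subst e; simp at h
  have : id_.length ≠ 0 := by simpa using hne
  simp [List.length_dropLast]; omega

-- the left-peeling while loop of _sep_cavity_id ('while not id_[0].isdigit(): ...')
def pvSepL (res : List Char) (id_ : List Char) : List Char × List Char :=
  match id_ with
  | [] => (res, [])                           -- Python raises IndexError here; outside Pre_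
  | c :: rest =>
    if PySem.Chars.isdigit c then (res, c :: rest)
    else pvSepL (res ++ [c]) rest

def pv_sep_cavity_id (id_ : List Char) : List Char × List Char :=
  match id_ with
  | [] => ([], [])                            -- id_[0] raises IndexError; outside Pre_
  | c :: rest =>
    if PySem.Chars.isdigit c then pvSepR (c :: rest) []
    else pvSepL [] (c :: rest)

def pv_enumerate_alpha (start stop : List Char) : List (List Char) :=
  match start, stop with
  | [a], [b] =>
    (PySem.List.pyRange (a.toNat : Int) ((b.toNat : Int) + 1) 1).foldl
      (fun res i => res ++ [[Char.ofNat i.toNat]]) []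
  | _, _ => []                                -- ord() raises TypeError on non-single-char; outside Pre_

def pv_enumerate_int (start stop : List Char) : List (List Char) :=
  match PySem.Int.ofChars? start, PySem.Int.ofChars? stop with
  | some a, some b =>
    (PySem.List.pyRange a (b + 1) 1).foldl (fun res i => res ++ [PySem.Int.toChars i]) []
  | _, _ => []                                -- int() raises ValueError; outside Pre_

def pv_enumerate_ids (start stop : List Char) : List (List Char) :=
  let has_numbers := ['1','2','3','4','5','6','7','8','9','0'].any
      (fun ch => PySem.Chars.isIn [ch] start)
  if PySem.Chars.strIsdigit start then pv_enumerate_int start stop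
  else if has_numbers then
    let sp := pv_sep_cavity_id start
    let tp := pv_sep_cavity_id stop
    if PySem.Chars.strIsdigit sp.1 then
      (pv_enumerate_int sp.1 tp.1).foldl
        (fun res p => (pv_enumerate_alpha sp.2 tp.2).foldl (fun r s => r ++ [p ++ s]) res) []
    else
      (pv_enumerate_alpha sp.1 tp.1).foldl
        (fun res p => (pv_enumerate_int sp.2 tp.2).foldl (fun r s => r ++ [p ++ s]) res) []
  else pv_enumerate_alpha start stop

def get_cavity_ids (str_cav : String) : List String :=
  let in_ids := (PySem.Chars.splitOn str_cav.toList [',']).map PySem.Chars.strip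
  let out_ids := in_ids.foldl (fun out id_ =>
      if PySem.Chars.isIn ['-'] id_ then
        match (PySem.Chars.splitOn id_ ['-']).map PySem.Chars.strip with
        | [s, t] => out ++ pv_enumerate_ids s t
        | _ => out                            -- tuple unpack raises ValueError; outside Pre_
      else out ++ [id_]) []
  out_ids.map String.ofList

-- ===== PORT B =====

-- digs = [k for k, c in enumerate(s) if c.isdigit()]   (zipIdx pairs are (value, index))
def pvDigitIdxs (s : List Char) : List Int :=
  ((s.zipIdx).filter (fun p => PySem.Chars.isdigit p.1)).map (fun p => (p.2 : Int))

def pvParse (s : List Char) : List Char × List Char × Bool :=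
  let digs := pvDigitIdxs s
  match s with
  | [] => ([], [], true)                      -- s[0] raises IndexError; outside Pre_
  | c :: _ =>
    if PySem.Chars.isdigit c then
      match PySem.List.pyGet? digs (-1) with
      | some k => (PySem.List.slice s none (some (k + 1)),
                   PySem.List.slice s (some (k + 1)) none, true)
      | none => ([], [], true)                -- digs[-1] raises IndexError; outside Pre_
    else
      match PySem.List.pyGet? digs 0 with
      | some j => (PySem.List.slice s (some j) none,
                   PySem.List.slice s none (some j), false)
      | none => ([], [], false)               -- digs[0] raises IndexError; outside Pre_

def pvIntRange (a b : List Char) : List (List Char) :=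
  match PySem.Int.ofChars? a, PySem.Int.ofChars? b with
  | some x, some y => (PySem.List.pyRange x (y + 1) 1).map PySem.Int.toChars
  | _, _ => []                                -- int() raises ValueError; outside Pre_

def pvChrRange (a b : List Char) : List (List Char) :=
  match a, b with
  | [x], [y] => (PySem.List.pyRange (x.toNat : Int) ((y.toNat : Int) + 1) 1).map
      (fun n => [Char.ofNat n.toNat])
  | _, _ => []                                -- ord() raises TypeError; outside Pre_

def pvExpand (start stop : List Char) : List (List Char) :=
  if PySem.Chars.strIsdigit start then pvIntRange start stop
  else if !(start.any PySem.Chars.isdigit) then pvChrRange start stop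
  else
    let sp := pvParse start
    let tp := pvParse stop
    let nums := pvIntRange sp.1 tp.1
    let alphas := pvChrRange sp.2.1 tp.2.1
    if sp.2.2 then nums.flatMap (fun n => alphas.map (fun a => n ++ a))
    else alphas.flatMap (fun a => nums.map (fun n => a ++ n))

def pvIds (id_ : List Char) : List (List Char) :=
  if !(PySem.Chars.isIn ['-'] id_) then [id_]
  else match (PySem.Chars.splitOn id_ ['-']).map PySem.Chars.strip with
    | [start, stop] => pvExpand start stop
    | _ => []                                 -- tuple unpack raises ValueError; outside Pre_

def get_cavity_ids_alt (str_cav : String) : List String :=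
  ((PySem.Chars.splitOn str_cav.toList [',']).flatMap
    (fun item => pvIds (PySem.Chars.strip item))).map String.ofList

-- ===== PRECONDITION & SPEC =====

-- shape helpers for Pre_: the split of an id at its last (resp. first) digit
def pvSufAlpha (a : List Char) : List Char :=
  (a.reverse.takeWhile (fun c => !PySem.Chars.isdigit c)).reverse
def pvBody (a : List Char) : List Char :=
  (a.reverse.dropWhile (fun c => !PySem.Chars.isdigit c)).reverse
def pvPreAlpha (a : List Char) : List Char :=
  a.takeWhile (fun c => !PySem.Chars.isdigit c)
def pvTail (a : List Char) : List Char :=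
  a.dropWhile (fun c => !PySem.Chars.isdigit c)

-- Pre_ admits exactly the well-formed tokens: a dash token must have one dash and two endpoints of
-- matching orientation whose digit field parses as an int and whose letter field is a single character.
-- Pre_ excludes (besides all inputs where A raises) range tokens with a malformed or
-- oppositely-oriented endpoint that A never inspects because the other endpoint already yields an
-- empty range — there A accidentally returns [] while B, which parses both endpoints, raises.
def pvPreTok (t : List Char) : Bool :=
  if !(PySem.Chars.isIn ['-'] t) then true
  else match (PySem.Chars.splitOn t ['-']).map PySem.Chars.strip with
  | [a, b] =>
    if PySem.Chars.strIsdigit a then (PySem.Int.ofChars? b).isSome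
    else if !(a.any PySem.Chars.isdigit) then a.length == 1 && b.length == 1
    else match a, b with
      | ca :: _, cb :: _ =>
        if PySem.Chars.isdigit ca then
          PySem.Chars.strIsdigit (pvBody a) && (pvSufAlpha a).length == 1 &&
          PySem.Chars.isdigit cb && (PySem.Int.ofChars? (pvBody b)).isSome &&
          (pvSufAlpha b).length == 1
        else
          (pvPreAlpha a).length == 1 && (PySem.Int.ofChars? (pvTail a)).isSome &&
          !(PySem.Chars.isdigit cb) && b.any PySem.Chars.isdigit &&
          (pvPreAlpha b).length == 1 && (PySem.Int.ofChars? (pvTail b)).isSome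
      | _, _ => false
  | _ => false

def Pre_get_cavity_ids (str_cav : String) : Prop :=
  ∀ t ∈ (PySem.Chars.splitOn str_cav.toList [',']).map PySem.Chars.strip, pvPreTok t = true
instance (str_cav : String) : Decidable (Pre_get_cavity_ids str_cav) := by
  unfold Pre_get_cavity_ids; infer_instance

def pvWitness_get_cavity_ids : String := "1-3, a-c, 2x-4z, B2-D3, plain"

def Spec_get_cavity_ids (str_cav : String) (out : List String) : Prop := out = get_cavity_ids_alt str_cav
instance (str_cav : String) (out : List String) : Decidable (Spec_get_cavity_ids str_cav out) := by unfold Spec_get_cavity_ids; infer_instance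

-- ===== CLAIM (what is proved, stated in full; the proofs are below) =====
def Claim_equal_get_cavity_ids : Prop := ∀ (str_cav : String), Dom_get_cavity_ids str_cav → Pre_get_cavity_ids str_cav → Spec_get_cavity_ids str_cav (get_cavity_ids str_cav)

-- ===== LEMMAS AND PROOFS =====

-- A's int enumeration equals B's (both [] on an unparsable endpoint)
theorem pv_enum_int_eq (a b : List Char) : pv_enumerate_int a b = pvIntRange a b := by
  unfold pv_enumerate_int pvIntRange
  cases PySem.Int.ofChars? a <;> cases PySem.Int.ofChars? b <;> simp only [] <;>
    rw [PySem.List.foldl_append_singleton_eq_map] <;> simp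

theorem pv_enum_alpha_eq (a b : List Char) : pv_enumerate_alpha a b = pvChrRange a b := by
  unfold pv_enumerate_alpha pvChrRange
  rcases a with _ | ⟨x, _ | ⟨y, t⟩⟩ <;> rcases b with _ | ⟨u, _ | ⟨v, w⟩⟩ <;> simp only [] <;>
    rw [PySem.List.foldl_append_singleton_eq_map] <;> simp

-- A's '1234567890' membership test equals B's any-isdigit test
theorem isdigit_mem_iff (c : Char) :
    PySem.Chars.isdigit c = true ↔ c ∈ ['1','2','3','4','5','6','7','8','9','0'] := by
  unfold PySem.Chars.isdigit
  constructor
  · intro h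
    simp only [Bool.and_eq_true, decide_eq_true_eq] at h
    obtain ⟨h1, h2⟩ := h
    have hlo : 48 ≤ c.toNat := h1
    have hhi : c.toNat ≤ 57 := h2
    have hofn : Char.ofNat c.toNat = c := Char.ofNat_toNat c
    interval_cases h3 : c.toNat <;> rw [← hofn] <;> decide
  · intro h; fin_cases h <;> decide

theorem singleton_isIn_iff (ch : Char) (a : List Char) :
    PySem.Chars.isIn [ch] a = true ↔ ch ∈ a := by
  rw [PySem.Chars.isIn_iff_infix]; exact List.singleton_infix_iff ch a

theorem pv_has_numbers_eq (a : List Char) :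
    (['1','2','3','4','5','6','7','8','9','0'].any (fun ch => PySem.Chars.isIn [ch] a))
      = a.any PySem.Chars.isdigit := by
  rcases h : a.any PySem.Chars.isdigit with _ | _
  · simp only [List.any_eq_false] at h
    simp only [List.any_eq_false]
    intro ch hch
    rw [singleton_isIn_iff]
    intro hmem
    exact (h ch hmem) ((isdigit_mem_iff ch).mpr hch)
  · simp only [List.any_eq_true] at h
    obtain ⟨c, hc, hd⟩ := h
    simp only [List.any_eq_true]
    exact ⟨c, (isdigit_mem_iff c).mp hd, (singleton_isIn_iff c a).mpr hc⟩

theorem pvSepR_spec (ys : List Char) (hys : ∀ y ∈ ys, PySem.Chars.isdigit y = false)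
    (xs : List Char) (c : Char) (hc : PySem.Chars.isdigit c = true) (acc : List Char) :
    pvSepR (xs ++ c :: ys) acc = (xs ++ [c], ys ++ acc) := by
  induction ys using List.reverseRecOn generalizing acc with
  | nil =>
      rw [pvSepR]
      split
      · next heq => rw [List.getLast?_concat] at heq; exact absurd heq (by simp)
      · next c1 heq =>
          rw [List.getLast?_concat] at heq
          obtain rfl : c = c1 := by injection heq
          simp [hc]
  | append_singleton ys d ih =>
      have hd : PySem.Chars.isdigit d = false := hys d (by simp)
      have h1 : xs ++ c :: (ys ++ [d]) = (xs ++ c :: ys) ++ [d] := by simp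
      rw [pvSepR]
      split
      · next heq => rw [h1, List.getLast?_concat] at heq; exact absurd heq (by simp)
      · next c1 heq =>
          rw [h1, List.getLast?_concat] at heq
          obtain rfl : d = c1 := by injection heq
          rw [hd]
          simp only [Bool.false_eq_true, if_false]
          have h2 : (xs ++ c :: (ys ++ [d])).dropLast = xs ++ c :: ys := by
            rw [h1, List.dropLast_concat]
          rw [h2, ih (fun y hy => hys y (by simp [hy])) (d :: acc)]
          simp

theorem pvSepL_spec (w : List Char) (hw : ∀ y ∈ w, PySem.Chars.isdigit y = false)
    (d : Char) (hd : PySem.Chars.isdigit d = true) (r acc : List Char) :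
    pvSepL acc (w ++ d :: r) = (acc ++ w, d :: r) := by
  induction w generalizing acc with
  | nil => simp [pvSepL, hd]
  | cons x xs ih =>
      have hx : PySem.Chars.isdigit x = false := hw x (by simp)
      simp only [List.cons_append, pvSepL, hx, Bool.false_eq_true, if_false]
      rw [ih (fun y hy => hw y (by simp [hy])) (acc ++ [x])]
      simp

-- decomposition of a digit-containing id at its last digit
theorem pv_decompR (a : List Char) (h : a.any PySem.Chars.isdigit = true) :
    (∃ xs c, pvBody a = xs ++ [c] ∧ PySem.Chars.isdigit c = true) ∧
    (∀ y ∈ pvSufAlpha a, PySem.Chars.isdigit y = false) ∧ a = pvBody a ++ pvSufAlpha a := by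
  have hdw : a.reverse.dropWhile (fun c => !PySem.Chars.isdigit c) ≠ [] := by
    intro he
    have := List.takeWhile_append_dropWhile (p := fun c => !PySem.Chars.isdigit c) (l := a.reverse)
    rw [he, List.append_nil] at this
    obtain ⟨c, hc, hd⟩ := List.any_eq_true.mp h
    have hcm : c ∈ a.reverse.takeWhile (fun c => !PySem.Chars.isdigit c) := by
      rw [this]; simpa using hc
    have := List.mem_takeWhile_imp hcm
    simp [hd] at this
  refine ⟨?_, ?_, ?_⟩
  · rcases hdd : a.reverse.dropWhile (fun c => !PySem.Chars.isdigit c) with _ | ⟨c, tl⟩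
    · exact absurd hdd hdw
    · refine ⟨tl.reverse, c, ?_, ?_⟩
      · simp [pvBody, hdd]
      · have := List.head_dropWhile_not (fun c => !PySem.Chars.isdigit c) hdw
        simp only [hdd, List.head_cons] at this; simpa using this
  · intro y hy
    unfold pvSufAlpha at hy
    rw [List.mem_reverse] at hy
    have := List.mem_takeWhile_imp hy
    simpa using this
  · unfold pvBody pvSufAlpha
    rw [← List.reverse_append, List.takeWhile_append_dropWhile, List.reverse_reverse]

-- decomposition of a digit-containing id at its first digit
theorem pv_decompL (a : List Char) (h : a.any PySem.Chars.isdigit = true) :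
    (∃ d r, pvTail a = d :: r ∧ PySem.Chars.isdigit d = true) ∧
    (∀ y ∈ pvPreAlpha a, PySem.Chars.isdigit y = false) ∧ a = pvPreAlpha a ++ pvTail a := by
  have hdw : a.dropWhile (fun c => !PySem.Chars.isdigit c) ≠ [] := by
    intro he
    have := List.takeWhile_append_dropWhile (p := fun c => !PySem.Chars.isdigit c) (l := a)
    rw [he, List.append_nil] at this
    obtain ⟨c, hc, hd⟩ := List.any_eq_true.mp h
    have hcm : c ∈ a.takeWhile (fun c => !PySem.Chars.isdigit c) := by rw [this]; exact hc
    have := List.mem_takeWhile_imp hcm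
    simp [hd] at this
  refine ⟨?_, ?_, ?_⟩
  · rcases hdd : a.dropWhile (fun c => !PySem.Chars.isdigit c) with _ | ⟨d, tl⟩
    · exact absurd hdd hdw
    · refine ⟨d, tl, by simp [pvTail, hdd], ?_⟩
      have := List.head_dropWhile_not (fun c => !PySem.Chars.isdigit c) hdw
      simp only [hdd, List.head_cons] at this; simpa using this
  · intro y hy
    have := List.mem_takeWhile_imp hy
    simpa using this
  · exact (List.takeWhile_append_dropWhile).symm

theorem pvDigitIdxs_cons (x : Char) (l : List Char) :
    pvDigitIdxs (x :: l) =
      (if PySem.Chars.isdigit x then [(0 : Int)] else []) ++ (pvDigitIdxs l).map (· + 1) := by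
  unfold pvDigitIdxs
  rw [List.zipIdx_cons, List.zipIdx_succ]
  rw [List.filter_cons]
  by_cases hx : PySem.Chars.isdigit x
  · simp only [hx, if_true, List.map_cons]
    rw [List.filter_map, List.map_map, List.map_map]
    simp [Function.comp_def]
  · simp only [hx, Bool.false_eq_true, if_false]
    rw [List.filter_map, List.map_map, List.map_map]
    simp [Function.comp_def]

theorem pvDigitIdxs_nil_of_nodigit (l : List Char) (h : ∀ y ∈ l, PySem.Chars.isdigit y = false) :
    pvDigitIdxs l = [] := by
  induction l with
  | nil => rfl
  | cons x xs ih =>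
      rw [pvDigitIdxs_cons, h x (by simp), ih (fun y hy => h y (by simp [hy]))]
      simp

theorem pvDigitIdxs_last (xs : List Char) (c : Char) (hc : PySem.Chars.isdigit c = true)
    (ys : List Char) (hys : ∀ y ∈ ys, PySem.Chars.isdigit y = false) :
    (pvDigitIdxs (xs ++ c :: ys)).getLast? = some (xs.length : Int) := by
  induction xs with
  | nil =>
      rw [List.nil_append, pvDigitIdxs_cons, hc, pvDigitIdxs_nil_of_nodigit ys hys]
      simp
  | cons x t ih =>
      rw [List.cons_append, pvDigitIdxs_cons, List.getLast?_append]
      have : ((pvDigitIdxs (t ++ c :: ys)).map (· + 1)).getLast? = some ((t.length : Int) + 1) := by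
        rw [List.getLast?_map, ih]; rfl
      rw [this]
      simp

theorem pvDigitIdxs_head (w : List Char) (hw : ∀ y ∈ w, PySem.Chars.isdigit y = false)
    (d : Char) (hd : PySem.Chars.isdigit d = true) (r : List Char) :
    (pvDigitIdxs (w ++ d :: r)).head? = some (w.length : Int) := by
  induction w with
  | nil => rw [List.nil_append, pvDigitIdxs_cons, hd]; simp
  | cons x t ih =>
      rw [List.cons_append, pvDigitIdxs_cons, hw x (by simp)]
      simp only [Bool.false_eq_true, if_false, List.nil_append]
      rw [List.head?_map, ih (fun y hy => hw y (by simp [hy]))]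
      simp

-- A's sep and B's parse agree with the canonical splits
theorem pv_sep_eq_R (a : List Char) (hany : a.any PySem.Chars.isdigit = true)
    (c : Char) (rest : List Char) (ha : a = c :: rest) (hc : PySem.Chars.isdigit c = true) :
    pv_sep_cavity_id a = (pvBody a, pvSufAlpha a) := by
  obtain ⟨⟨xs, cc, hbody, hcc⟩, hsuf, hsplit⟩ := pv_decompR a hany
  have ha2 : a = xs ++ cc :: pvSufAlpha a := by
    conv_lhs => rw [hsplit, hbody]
    simp
  have hsep : pvSepR a [] = (pvBody a, pvSufAlpha a) := by
    conv_lhs => rw [ha2]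
    rw [pvSepR_spec (pvSufAlpha a) hsuf xs cc hcc []]
    rw [hbody]; simp
  rw [ha] at hsep ⊢
  simp [pv_sep_cavity_id, hc, hsep]

theorem pv_sep_eq_L (a : List Char) (hany : a.any PySem.Chars.isdigit = true)
    (c : Char) (rest : List Char) (ha : a = c :: rest) (hc : PySem.Chars.isdigit c = false) :
    pv_sep_cavity_id a = (pvPreAlpha a, pvTail a) := by
  obtain ⟨⟨d, r, htail, hd⟩, hpre, hsplit⟩ := pv_decompL a hany
  have ha2 : a = pvPreAlpha a ++ d :: r := by rw [← htail]; exact hsplit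
  have hsep : pvSepL [] a = (pvPreAlpha a, pvTail a) := by
    conv_lhs => rw [ha2]
    rw [pvSepL_spec (pvPreAlpha a) hpre d hd r []]
    rw [htail]; simp
  rw [ha] at hsep ⊢
  simp [pv_sep_cavity_id, hc, hsep]

theorem pvParse_eq_R (a : List Char) (hany : a.any PySem.Chars.isdigit = true)
    (c : Char) (rest : List Char) (ha : a = c :: rest) (hc : PySem.Chars.isdigit c = true) :
    pvParse a = (pvBody a, pvSufAlpha a, true) := by
  obtain ⟨⟨xs, cc, hbody, hcc⟩, hsuf, hsplit⟩ := pv_decompR a hany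
  have ha2 : a = xs ++ cc :: pvSufAlpha a := by
    conv_lhs => rw [hsplit, hbody]
    simp
  have hlast : (pvDigitIdxs a).getLast? = some (xs.length : Int) := by
    conv_lhs => rw [ha2]
    exact pvDigitIdxs_last xs cc hcc (pvSufAlpha a) hsuf
  have hget : PySem.List.pyGet? (pvDigitIdxs a) (-1) = some (xs.length : Int) := by
    rw [PySem.List.pyGet?_neg_one, hlast]
  have htake : PySem.List.slice a none (some ((xs.length : Int) + 1)) = pvBody a := by
    rw [PySem.List.slice_to _ (by omega)]
    have h1 : ((xs.length : Int) + 1).toNat = (xs ++ [cc]).length := by simp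
    rw [h1]
    conv_lhs => rw [ha2, show xs ++ cc :: pvSufAlpha a = (xs ++ [cc]) ++ pvSufAlpha a by simp]
    rw [List.take_left, hbody]
  have hdrop : PySem.List.slice a (some ((xs.length : Int) + 1)) none = pvSufAlpha a := by
    rw [PySem.List.slice_from _ (by omega)]
    have h1 : ((xs.length : Int) + 1).toNat = (xs ++ [cc]).length := by simp
    rw [h1]
    conv_lhs => rw [ha2, show xs ++ cc :: pvSufAlpha a = (xs ++ [cc]) ++ pvSufAlpha a by simp]
    rw [List.drop_left]
  rw [ha] at hget htake hdrop ⊢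
  simp [pvParse, hc, hget, htake, hdrop]

theorem pvParse_eq_L (a : List Char) (hany : a.any PySem.Chars.isdigit = true)
    (c : Char) (rest : List Char) (ha : a = c :: rest) (hc : PySem.Chars.isdigit c = false) :
    pvParse a = (pvTail a, pvPreAlpha a, false) := by
  obtain ⟨⟨d, r, htail, hd⟩, hpre, hsplit⟩ := pv_decompL a hany
  have ha2 : a = pvPreAlpha a ++ d :: r := by rw [← htail]; exact hsplit
  have hhead : (pvDigitIdxs a).head? = some ((pvPreAlpha a).length : Int) := by
    conv_lhs => rw [ha2]
    exact pvDigitIdxs_head (pvPreAlpha a) hpre d hd r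
  have hget : PySem.List.pyGet? (pvDigitIdxs a) 0 = some ((pvPreAlpha a).length : Int) := by
    rw [PySem.List.pyGet?_zero, ← List.head?_eq_getElem?, hhead]
  have hdrop : PySem.List.slice a (some ((pvPreAlpha a).length : Int)) none = pvTail a := by
    rw [PySem.List.slice_from _ (by omega)]
    simp only [Int.toNat_natCast]
    nth_rewrite 2 [hsplit]
    rw [List.drop_left]
  have htake : PySem.List.slice a none (some ((pvPreAlpha a).length : Int)) = pvPreAlpha a := by
    rw [PySem.List.slice_to _ (by omega)]
    simp only [Int.toNat_natCast]
    exact (List.prefix_iff_eq_take.mp (List.takeWhile_prefix _)).symm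
  rw [ha] at hget htake hdrop ⊢
  simp [pvParse, hc, hget, htake, hdrop]

-- A's nested append loop is a flatMap of maps
theorem pv_foldl_nested (L M : List (List Char)) (init : List (List Char)) :
    L.foldl (fun res p => M.foldl (fun r s => r ++ [p ++ s]) res) init
      = init ++ L.flatMap (fun p => M.map (fun s => p ++ s)) := by
  induction L generalizing init with
  | nil => simp
  | cons p L ih =>
      simp only [List.foldl_cons, List.flatMap_cons]
      rw [PySem.List.foldl_append_singleton_eq_map, ih, List.append_assoc]

theorem pv_strIsdigit_false_of_nondigit_mem (a : List Char) (c : Char)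
    (hc : c ∈ a) (h : PySem.Chars.isdigit c = false) : PySem.Chars.strIsdigit a = false := by
  have hall : a.all PySem.Chars.isdigit = false := by
    rw [List.all_eq_false]; exact ⟨c, hc, by simp [h]⟩
  simp [PySem.Chars.strIsdigit, hall]

-- the per-token equivalence
theorem pv_expand_eq (a b : List Char)
    (H : (if PySem.Chars.strIsdigit a then (PySem.Int.ofChars? b).isSome
     else if !(a.any PySem.Chars.isdigit) then a.length == 1 && b.length == 1
     else match a, b with
      | ca :: _, cb :: _ =>
        if PySem.Chars.isdigit ca then
          PySem.Chars.strIsdigit (pvBody a) && (pvSufAlpha a).length == 1 &&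
          PySem.Chars.isdigit cb && (PySem.Int.ofChars? (pvBody b)).isSome &&
          (pvSufAlpha b).length == 1
        else
          (pvPreAlpha a).length == 1 && (PySem.Int.ofChars? (pvTail a)).isSome &&
          !(PySem.Chars.isdigit cb) && b.any PySem.Chars.isdigit &&
          (pvPreAlpha b).length == 1 && (PySem.Int.ofChars? (pvTail b)).isSome
      | _, _ => false) = true) :
    pv_enumerate_ids a b = pvExpand a b := by
  unfold pv_enumerate_ids pvExpand
  rw [pv_has_numbers_eq a]
  by_cases h1 : PySem.Chars.strIsdigit a
  · simp only [h1, if_true]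
    exact pv_enum_int_eq a b
  · simp only [h1, Bool.false_eq_true, if_false] at H ⊢
    by_cases h2 : a.any PySem.Chars.isdigit
    · simp only [h2, Bool.not_true, Bool.false_eq_true, if_false] at H ⊢
      rcases a with _ | ⟨ca, ra⟩
      · simp at h2
      rcases b with _ | ⟨cb, rb⟩
      · simp at H
      by_cases hca : PySem.Chars.isdigit ca
      · simp only [hca, if_true] at H
        obtain ⟨⟨⟨⟨hB1, _⟩, hcb⟩, _⟩, _⟩ := by
          simpa only [Bool.and_eq_true] using H
        have hbany : (cb :: rb).any PySem.Chars.isdigit = true := by simp [hcb]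
        rw [pv_sep_eq_R (ca :: ra) h2 ca ra rfl hca,
            pv_sep_eq_R (cb :: rb) hbany cb rb rfl hcb,
            pvParse_eq_R (ca :: ra) h2 ca ra rfl hca,
            pvParse_eq_R (cb :: rb) hbany cb rb rfl hcb]
        simp only [hB1, if_true]
        rw [pv_foldl_nested, pv_enum_int_eq, pv_enum_alpha_eq]
        simp
      · simp only [hca, Bool.false_eq_true, if_false] at H
        obtain ⟨⟨⟨⟨⟨_, _⟩, hcb⟩, hbany⟩, _⟩, _⟩ := by
          simpa only [Bool.and_eq_true] using H
        have hcb' : PySem.Chars.isdigit cb = false := by simpa using hcb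
        rw [pv_sep_eq_L (ca :: ra) h2 ca ra rfl (by simpa using hca),
            pv_sep_eq_L (cb :: rb) hbany cb rb rfl hcb',
            pvParse_eq_L (ca :: ra) h2 ca ra rfl (by simpa using hca),
            pvParse_eq_L (cb :: rb) hbany cb rb rfl hcb']
        have hpa : PySem.Chars.strIsdigit (pvPreAlpha (ca :: ra)) = false := by
          apply pv_strIsdigit_false_of_nondigit_mem _ ca _ (by simpa using hca)
          simp [pvPreAlpha, List.takeWhile_cons, hca]
        simp only [hpa, Bool.false_eq_true, if_false]
        rw [pv_foldl_nested, pv_enum_int_eq, pv_enum_alpha_eq]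
        simp
    · simp only [h2, Bool.not_false, if_true]
      exact pv_enum_alpha_eq a b

theorem pv_tok_eq (t : List Char) (h : pvPreTok t = true) :
    (if PySem.Chars.isIn ['-'] t then
      match (PySem.Chars.splitOn t ['-']).map PySem.Chars.strip with
      | [s, u] => pv_enumerate_ids s u
      | _ => []
     else [t]) = pvIds t := by
  unfold pvIds
  unfold pvPreTok at h
  by_cases hin : PySem.Chars.isIn ['-'] t
  · simp only [hin, if_true, Bool.not_true, Bool.false_eq_true, if_false] at h ⊢
    rcases hsp : (PySem.Chars.splitOn t ['-']).map PySem.Chars.strip with _ | ⟨a, _ | ⟨b, _ | _⟩⟩ <;>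
      rw [hsp] at h
    all_goals first
      | exact pv_expand_eq a b h
      | exact Bool.noConfusion h
  · simp [hin]

theorem flatMap_congr_mem {α β : Type} (l : List α) (f g : α → List β)
    (h : ∀ a ∈ l, f a = g a) : l.flatMap f = l.flatMap g := by
  rw [List.flatMap_def, List.flatMap_def, List.map_congr_left h]

-- ===== VERDICT (by name: the statement is the Claim_ definition above) =====
theorem get_cavity_ids_spec : Claim_equal_get_cavity_ids := by
  unfold Claim_equal_get_cavity_ids
  intro s _hdom hpre
  unfold Pre_get_cavity_ids at hpre
  unfold Spec_get_cavity_ids get_cavity_ids get_cavity_ids_alt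
  simp only []
  refine congrArg (List.map String.ofList) ?_
  have hstep : ((PySem.Chars.splitOn s.toList [',']).map PySem.Chars.strip).foldl
      (fun out id_ =>
        if PySem.Chars.isIn ['-'] id_ then
          match (PySem.Chars.splitOn id_ ['-']).map PySem.Chars.strip with
          | [u, v] => out ++ pv_enumerate_ids u v
          | _ => out
        else out ++ [id_]) []
      = ((PySem.Chars.splitOn s.toList [',']).map PySem.Chars.strip).foldl
      (fun out id_ => out ++
        (if PySem.Chars.isIn ['-'] id_ then
          match (PySem.Chars.splitOn id_ ['-']).map PySem.Chars.strip with
          | [u, v] => pv_enumerate_ids u v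
          | _ => []
        else [id_])) [] := by
    apply PySem.List.foldl_congr_mem
    intro acc t _
    by_cases hi : PySem.Chars.isIn ['-'] t
    · simp only [hi, if_true]
      rcases (PySem.Chars.splitOn t ['-']).map PySem.Chars.strip with _ | ⟨x, _ | ⟨y, _ | _⟩⟩ <;>
        simp
    · simp [hi]
  rw [hstep, PySem.List.foldl_append_eq_flatMap]
  rw [List.nil_append]
  have htok := fun t ht => pv_tok_eq t (hpre t ht)
  rw [flatMap_congr_mem _ _ _ htok]
  rw [List.flatMap_map]
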